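-- pv_equiv track=rewrite | github.com/juanpablobaez1992/Scriptorium | scriptorium/auth_cli.py | _upsert_env_var
-- ===== SOURCE A (Python) =====
-- def _upsert_env_var(lines: list[str], key: str, value: str) -> list[str]:
--     replaced = False
--     output: list[str] = []
--     prefix = f"{key}="
--     for line in lines:
--         normalized = line.lstrip("\ufeff")
--         if normalized.startswith(prefix):
--             if not replaced:
--                 output.append(f"{prefix}{value}")
--                 replaced = True
--             continue
--         output.append(line)
--     if not replaced:
--         output.append(f"{prefix}{value}")
--     return output
-- ===== SOURCE B (Python) =====
-- def _upsert_env_var(lines: list[str], key: str, value: str) -> list[str]: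
--     prefix = f"{key}="
--     new_line = f"{prefix}{value}"
--     idx = next((i for i, l in enumerate(lines) if l.lstrip("\ufeff").startswith(prefix)), None)
--     if idx is None:
--         return lines + [new_line]
--     return lines[:idx] + [new_line] + [l for l in lines[idx + 1:] if not l.lstrip("\ufeff").startswith(prefix)]
-- ===== Notes on version B (the rewrite author's own statement) =====
-- stated objective: alternative
-- what changed: Replaces the flag-driven single-pass accumulation with a find-first-index, then head slice + single new line + duplicate-filtered tail slice.
import Mathlib
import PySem

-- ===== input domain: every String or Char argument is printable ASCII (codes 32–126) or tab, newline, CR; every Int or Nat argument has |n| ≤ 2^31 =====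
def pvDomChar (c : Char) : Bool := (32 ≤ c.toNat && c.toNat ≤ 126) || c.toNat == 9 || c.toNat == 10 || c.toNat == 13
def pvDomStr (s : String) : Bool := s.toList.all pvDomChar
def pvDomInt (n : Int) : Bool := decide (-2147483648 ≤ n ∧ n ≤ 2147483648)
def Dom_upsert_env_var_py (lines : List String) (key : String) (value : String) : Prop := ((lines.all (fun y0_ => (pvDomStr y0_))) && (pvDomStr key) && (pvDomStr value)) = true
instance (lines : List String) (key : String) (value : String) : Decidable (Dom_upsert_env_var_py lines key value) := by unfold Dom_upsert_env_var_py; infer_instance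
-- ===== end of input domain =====

-- B replaces A's flag-driven single-pass accumulation by find-first-index + head slice + filtered tail (objective: alternative, same cost).

-- shared helper: Python's line.lstrip("\ufeff").startswith(prefix)
-- (lstrip with an explicit char set drops exactly the leading chars of that set: exact)
def pvMatch (pfx : List Char) (l : String) : Bool :=
  PySem.Chars.startswith (l.toList.dropWhile (fun c => c == '\ufeff')) pfx

-- ===== PORT A =====
-- the for-loop of A as structural recursion over (remaining lines, replaced flag)
def upsertGoA (pfx : List Char) (newl : String) : List String → Bool → List String
  | [], replaced => if replaced then [] else [newl]
  | l :: ls, replaced =>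
    if pvMatch pfx l then
      if replaced then upsertGoA pfx newl ls replaced
      else newl :: upsertGoA pfx newl ls true
    else l :: upsertGoA pfx newl ls replaced

def upsert_env_var_py (lines : List String) (key : String) (value : String) : List String :=
  let prefixStr := key ++ "="
  upsertGoA prefixStr.toList (prefixStr ++ value) lines false

-- ===== PORT B =====
def upsert_env_var_py_alt (lines : List String) (key : String) (value : String) : List String :=
  let prefixStr := key ++ "="
  let newl := prefixStr ++ value
  match lines.findIdx? (fun l => pvMatch prefixStr.toList l) with
  | none => lines ++ [newl]
  | some i => lines.take i ++ [newl] ++ (lines.drop (i + 1)).filter (fun l => !pvMatch prefixStr.toList l)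

-- ===== PRECONDITION & SPEC =====
def Spec_upsert_env_var_py (lines : List String) (key : String) (value : String) (out : List String) : Prop := out = upsert_env_var_py_alt lines key value
instance (lines : List String) (key : String) (value : String) (out : List String) : Decidable (Spec_upsert_env_var_py lines key value out) := by unfold Spec_upsert_env_var_py; infer_instance

-- ===== CLAIM (what is proved, stated in full; the proofs are below) =====
def Claim_equal_upsert_env_var_py : Prop := ∀ (lines : List String) (key : String) (value : String), Dom_upsert_env_var_py lines key value → Spec_upsert_env_var_py lines key value (upsert_env_var_py lines key value)

-- ===== LEMMAS AND PROOFS =====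
-- once the flag is set, A only filters out further matching lines
theorem upsertGoA_true (pfx : List Char) (newl : String) (ls : List String) :
    upsertGoA pfx newl ls true = ls.filter (fun l => !pvMatch pfx l) := by
  induction ls with
  | nil => simp [upsertGoA]
  | cons l ls ih =>
    by_cases h : pvMatch pfx l = true <;> simp [upsertGoA, h, ih]

theorem upsertGoA_false (pfx : List Char) (newl : String) (ls : List String) :
    upsertGoA pfx newl ls false =
      match ls.findIdx? (fun l => pvMatch pfx l) with
      | none => ls ++ [newl]
      | some i => ls.take i ++ [newl] ++ (ls.drop (i + 1)).filter (fun l => !pvMatch pfx l) := by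
  induction ls with
  | nil => simp [upsertGoA]
  | cons l ls ih =>
    by_cases h : pvMatch pfx l = true
    · simp [upsertGoA, h, List.findIdx?_cons, upsertGoA_true]
    · simp only [upsertGoA, h, if_false, List.findIdx?_cons, Bool.false_eq_true, ih]
      cases hf : ls.findIdx? (fun l => pvMatch pfx l) with
      | none => simp
      | some i => simp [List.take_succ_cons, List.drop_succ_cons]

-- ===== VERDICT (by name: the statement is the Claim_ definition above) =====
theorem upsert_env_var_py_spec : Claim_equal_upsert_env_var_py := by
  intro lines key value _
  show _ = _
  simp only [upsert_env_var_py, upsert_env_var_py_alt, upsertGoA_false]
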